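-- pv_equiv track=rewrite | github.com/epsilla-cloud/clawtrace | costcraft/costcraft/runner.py | _extract_final_message
-- ===== SOURCE A (Python) =====
-- def _extract_final_message(stdout: str) -> str:
--     """Heuristic: everything after the last timestamp-tagged line is the agent's reply."""
--     lines = stdout.splitlines()
--     out_lines: list[str] = []
--     for ln in reversed(lines):
--         if ln.startswith("2026-") or ln.startswith("[plugins]") or ln.startswith("[tools]"):
--             break
--         out_lines.append(ln)
--     return "\n".join(reversed(out_lines)).strip()
-- ===== SOURCE B (Python) =====
-- def _extract_final_message(stdout: str) -> str:
--     """Heuristic: everything after the last timestamp-tagged line is the agent's reply."""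
--     lines = stdout.splitlines()
--     last = -1
--     for i, ln in enumerate(lines):
--         if ln.startswith("2026-") or ln.startswith("[plugins]") or ln.startswith("[tools]"):
--             last = i
--     return "\n".join(lines[last + 1:]).strip()
-- ===== Notes on version B (the rewrite author's own statement) =====
-- stated objective: simpler
-- what changed: Forward scan that records the index of the last tagged line and slices the tail, instead of a backward scan with an early break that accumulates a reversed list and reverses it back; no list building or double reversal.
import Mathlib
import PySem

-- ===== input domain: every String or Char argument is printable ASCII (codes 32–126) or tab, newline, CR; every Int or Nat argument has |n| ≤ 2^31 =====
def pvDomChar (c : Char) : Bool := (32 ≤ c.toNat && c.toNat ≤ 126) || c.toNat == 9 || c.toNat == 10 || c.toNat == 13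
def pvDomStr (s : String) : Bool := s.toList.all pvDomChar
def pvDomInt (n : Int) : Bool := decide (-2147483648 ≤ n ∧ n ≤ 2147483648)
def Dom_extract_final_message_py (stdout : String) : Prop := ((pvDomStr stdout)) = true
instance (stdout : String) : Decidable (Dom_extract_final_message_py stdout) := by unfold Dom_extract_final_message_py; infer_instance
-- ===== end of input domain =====

-- B replaces A's backward scan-with-break (which accumulates a reversed tail and reverses it back)
-- by a forward scan recording the last tagged line's index, then slicing the tail: simpler decomposition.

-- shared tag test (the literal condition of both Pythons' if)
def pvTag (ln : String) : Bool :=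
  PySem.Str.startswith ln "2026-" || PySem.Str.startswith ln "[plugins]" || PySem.Str.startswith ln "[tools]"

-- ===== PORT A =====
-- the for-loop over reversed(lines) with break, accumulating out_lines
def pvLoopA : List String → List String → List String
  | [], acc => acc
  | ln :: rest, acc => if pvTag ln then acc else pvLoopA rest (acc ++ [ln])

def extract_final_message_py (stdout : String) : String :=
  let lines := PySem.Str.splitlines stdout
  PySem.Str.strip (PySem.Str.join "\n" (pvLoopA lines.reverse []).reverse)

-- ===== PORT B =====
-- the forward for-loop over enumerate(lines), updating last
def pvLastTag (lines : List String) : Int :=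
  (PySem.List.enumerate lines 0).foldl (fun last p => if pvTag p.2 then p.1 else last) (-1)

def extract_final_message_py_alt (stdout : String) : String :=
  let lines := PySem.Str.splitlines stdout
  PySem.Str.strip (PySem.Str.join "\n" (PySem.List.slice lines (some (pvLastTag lines + 1)) none))

-- ===== PRECONDITION & SPEC =====
def Spec_extract_final_message_py (stdout : String) (out : String) : Prop := out = extract_final_message_py_alt stdout
instance (stdout : String) (out : String) : Decidable (Spec_extract_final_message_py stdout out) := by unfold Spec_extract_final_message_py; infer_instance

-- ===== CLAIM (what is proved, stated in full; the proofs are below) =====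
def Claim_equal_extract_final_message_py : Prop := ∀ (stdout : String), Dom_extract_final_message_py stdout → Spec_extract_final_message_py stdout (extract_final_message_py stdout)

-- ===== LEMMAS AND PROOFS =====

-- A's loop with any accumulator is the accumulator ++ the untagged prefix of its input
theorem pvLoopA_eq_takeWhile (rl acc : List String) :
    pvLoopA rl acc = acc ++ rl.takeWhile (fun s => !pvTag s) := by
  induction rl generalizing acc with
  | nil => simp [pvLoopA]
  | cons ln rest ih =>
    by_cases h : pvTag ln <;> simp [pvLoopA, h, ih]

-- takeWhile is a take of its own length
theorem takeWhile_eq_take (p : String → Bool) (xs : List String) :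
    xs.takeWhile p = xs.take (xs.takeWhile p).length := by
  induction xs with
  | nil => simp
  | cons a t ih => by_cases h : p a <;> simp [h, ih.symm]

theorem length_takeWhile_le (p : String → Bool) (xs : List String) :
    (xs.takeWhile p).length ≤ xs.length := by
  rw [takeWhile_eq_take]
  simpa using List.length_take_le (xs := xs) (i := (xs.takeWhile p).length)

-- B's last-tagged index, characterised by the length of the untagged suffix
theorem pvLastTag_eq (l : List String) :
    pvLastTag l = (l.length : Int) - 1 - ((l.reverse.takeWhile (fun s => !pvTag s)).length : Int) := by
  induction l using List.reverseRecOn with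
  | nil => simp [pvLastTag]
  | append_singleton t x ih =>
    unfold pvLastTag at *
    rw [PySem.List.enumerate_append, List.foldl_append]
    by_cases h : pvTag x <;>
      simp [PySem.List.enumerate, h, ih]; omega

-- the two line lists agree
theorem lines_eq (l : List String) :
    (pvLoopA l.reverse []).reverse = PySem.List.slice l (some (pvLastTag l + 1)) none := by
  rw [pvLoopA_eq_takeWhile, pvLastTag_eq]
  have hle := length_takeWhile_le (fun s => !pvTag s) l.reverse
  rw [List.length_reverse] at hle
  set t := (l.reverse.takeWhile (fun s => !pvTag s)).length with ht
  have hcast : (l.length : Int) - 1 - (t : Int) + 1 = ((l.length - t : Nat) : Int) := by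
    push_cast [Nat.cast_sub hle]; ring
  rw [hcast, PySem.List.slice_from_natCast, takeWhile_eq_take, ← ht, List.take_reverse]
  simp

-- ===== VERDICT (by name: the statement is the Claim_ definition above) =====
theorem extract_final_message_py_spec : Claim_equal_extract_final_message_py := by
  intro stdout _
  unfold Spec_extract_final_message_py extract_final_message_py extract_final_message_py_alt
  simp only []
  rw [lines_eq]
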